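-- pv_equiv track=rewrite | github.com/hanetzer/chromiumos-overlay | dev-lang/go/files/pie_wrapper.py | has_ldflags
-- ===== SOURCE A (Python) =====
-- def has_ldflags(argv):
--   """Check if any linker flags are present in argv."""
--   link_flags = set(('-ldflags', '-linkmode', '-extld', '-extldflags'))
--   if set(argv) & link_flags:
--     return True
--   for arg in argv:
--     if arg.startswith('-ldflags=') or arg.startswith('-linkmode='):
--       return True
--   return False
-- ===== SOURCE B (Python) =====
-- def has_ldflags(argv):
--   """Check if any linker flags are present in argv."""
--   for arg in argv:
--     head, sep, _ = arg.partition('=')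
--     if head in ('-ldflags', '-linkmode'):
--       return True
--     if not sep and head in ('-extld', '-extldflags'):
--       return True
--   return False
-- ===== Notes on version B (the rewrite author's own statement) =====
-- stated objective: alternative
-- what changed: B parses each argument by splitting it at the first '=' and compares the resulting head against the flag names ('-ldflags'/'-linkmode' with or without '=', '-extld'/'-extldflags' only without), in one early-exit pass, instead of A's whole-argv set construction + intersection followed by a separate startswith pass.
import Mathlib
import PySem

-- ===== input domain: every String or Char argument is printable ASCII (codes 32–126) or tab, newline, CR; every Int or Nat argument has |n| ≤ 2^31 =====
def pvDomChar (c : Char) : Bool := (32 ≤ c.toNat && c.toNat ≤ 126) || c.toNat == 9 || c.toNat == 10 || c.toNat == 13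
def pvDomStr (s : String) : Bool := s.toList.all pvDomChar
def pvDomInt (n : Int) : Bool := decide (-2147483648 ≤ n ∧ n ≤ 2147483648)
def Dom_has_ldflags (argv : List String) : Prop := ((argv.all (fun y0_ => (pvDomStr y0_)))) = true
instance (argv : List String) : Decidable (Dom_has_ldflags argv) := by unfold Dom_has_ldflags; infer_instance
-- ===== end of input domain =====

-- B parses each argument at its first '=' and matches the head against the flag names,
-- in one early-exit pass, instead of A's set intersection plus a separate startswith pass.

-- ===== PORT A =====
-- the exact-match linker flag set
def pvLinkFlags : PySem.Set String :=
  PySem.Set.ofList ["-ldflags", "-linkmode", "-extld", "-extldflags"]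

-- second phase of A: the explicit prefix loop with early return
def pvLoopA : List String → Bool
  | [] => false
  | arg :: rest =>
      if PySem.Str.startswith arg "-ldflags=" || PySem.Str.startswith arg "-linkmode=" then
        true
      else pvLoopA rest

def has_ldflags (argv : List String) : Bool :=
  -- 'if set(argv) & link_flags: return True'
  if PySem.Set.inter (PySem.Set.ofList argv) pvLinkFlags ≠ [] then true
  else pvLoopA argv

-- ===== PORT B =====
-- hand port of str.partition('='): chars before the first '=', and whether '=' occurs.
-- Exact for a one-character separator: Python's head is everything before the first '=',
-- sep is '=' if found ('not sep' ↔ second component false); the tail is unused by B.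
def pvSplitEq : List Char → List Char × Bool
  | [] => ([], false)
  | c :: cs =>
      if c = '=' then ([], true)
      else
        let r := pvSplitEq cs
        (c :: r.1, r.2)

-- B's loop: partition each arg, compare the head against the flag names
def pvLoopB : List String → Bool
  | [] => false
  | arg :: rest =>
      let r := pvSplitEq arg.toList
      if r.1 = "-ldflags".toList || r.1 = "-linkmode".toList then true
      else if !r.2 && (r.1 = "-extld".toList || r.1 = "-extldflags".toList) then true
      else pvLoopB rest

def has_ldflags_alt (argv : List String) : Bool := pvLoopB argv

-- ===== PRECONDITION & SPEC =====
def Spec_has_ldflags (argv : List String) (out : Bool) : Prop := out = has_ldflags_alt argv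
instance (argv : List String) (out : Bool) : Decidable (Spec_has_ldflags argv out) := by unfold Spec_has_ldflags; infer_instance

-- ===== CLAIM (what is proved, stated in full; the proofs are below) =====
def Claim_equal_has_ldflags : Prop := ∀ (argv : List String), Dom_has_ldflags argv → Spec_has_ldflags argv (has_ldflags argv)

-- ===== LEMMAS AND PROOFS =====

-- A's per-element test, as a single predicate
def pvAElem (s : String) : Bool :=
  pvLinkFlags.contains s
  || PySem.Str.startswith s "-ldflags="
  || PySem.Str.startswith s "-linkmode="

-- B's per-element test, as a single predicate
def pvBElem (s : String) : Bool :=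
  let r := pvSplitEq s.toList
  (r.1 = "-ldflags".toList || r.1 = "-linkmode".toList)
  || (!r.2 && (r.1 = "-extld".toList || r.1 = "-extldflags".toList))

theorem pvLoopA_eq_any (argv : List String) :
    pvLoopA argv = argv.any (fun arg =>
      PySem.Str.startswith arg "-ldflags=" || PySem.Str.startswith arg "-linkmode=") := by
  induction argv with
  | nil => rfl
  | cons a rest ih =>
      rw [List.any_cons, ← ih]
      show (if PySem.Str.startswith a "-ldflags=" || PySem.Str.startswith a "-linkmode="
            then true else pvLoopA rest) = _
      split_ifs with h
      · rw [h]; simp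
      · rw [Bool.not_eq_true] at h; rw [h]; simp

theorem pvLoopB_eq_any (argv : List String) : pvLoopB argv = argv.any pvBElem := by
  induction argv with
  | nil => rfl
  | cons a rest ih =>
      rw [List.any_cons, ← ih]
      have hB : pvBElem a =
          ((decide ((pvSplitEq a.toList).1 = "-ldflags".toList)
            || decide ((pvSplitEq a.toList).1 = "-linkmode".toList))
           || (!(pvSplitEq a.toList).2
               && (decide ((pvSplitEq a.toList).1 = "-extld".toList)
                   || decide ((pvSplitEq a.toList).1 = "-extldflags".toList)))) := rfl
      rw [hB]
      show (if (decide ((pvSplitEq a.toList).1 = "-ldflags".toList)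
                || decide ((pvSplitEq a.toList).1 = "-linkmode".toList)) = true then true
            else if (!(pvSplitEq a.toList).2
                && (decide ((pvSplitEq a.toList).1 = "-extld".toList)
                    || decide ((pvSplitEq a.toList).1 = "-extldflags".toList))) = true then true
            else pvLoopB rest) = _
      split_ifs with h1 h2
      · rw [h1]; simp
      · rw [h2]; simp
      · rw [Bool.not_eq_true] at h1 h2
        rw [h1, h2]; simp

theorem splitEq_no (l : List Char) (h : '=' ∉ l) : pvSplitEq l = (l, false) := by
  induction l with
  | nil => rfl
  | cons c cs ih =>
      simp only [pvSplitEq]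
      rw [if_neg (by intro hc; exact h (hc ▸ List.mem_cons_self)),
          ih (fun hm => h (List.mem_cons_of_mem _ hm))]

theorem splitEq_append (p rest : List Char) (h : '=' ∉ p) :
    pvSplitEq (p ++ '=' :: rest) = (p, true) := by
  induction p with
  | nil => simp [pvSplitEq]
  | cons c cs ih =>
      simp only [List.cons_append, pvSplitEq]
      rw [if_neg (by intro hc; exact h (hc ▸ List.mem_cons_self)),
          ih (fun hm => h (List.mem_cons_of_mem _ hm))]

theorem splitEq_cases (l : List Char) :
    ('=' ∉ l) ∨ ∃ p rest, l = p ++ '=' :: rest ∧ '=' ∉ p := by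
  induction l with
  | nil => exact Or.inl (by simp)
  | cons c cs ih =>
      by_cases hc : c = '='
      · exact Or.inr ⟨[], cs, by simp [hc]⟩
      · rcases ih with h | ⟨p, rest, hl, hp⟩
        · exact Or.inl (by simp [h, Ne.symm hc])
        · exact Or.inr ⟨c :: p, rest, by simp [hl], by simp [hp, Ne.symm hc]⟩

-- a flag followed by '=' is a prefix of s iff s's head (before the first '=') is exactly that flag
theorem startswith_head (s flag flagEq : String) (hfe : flagEq.toList = flag.toList ++ ['='])
    (hf : '=' ∉ flag.toList) (p rest : List Char)
    (hl : s.toList = p ++ '=' :: rest) (hp : '=' ∉ p) :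
    PySem.Str.startswith s flagEq = decide (p = flag.toList) := by
  by_cases hpd : p = flag.toList
  · subst hpd
    have hpre : flagEq.toList <+: s.toList := ⟨rest, by rw [hfe, hl]; simp⟩
    rw [PySem.Str.startswith_eq, (PySem.Chars.startswith_iff _ _).2 hpre]
    simp
  · simp only [hpd, decide_false]
    rw [← Bool.not_eq_true, PySem.Str.startswith_eq]
    intro hb
    obtain ⟨t, ht⟩ := (PySem.Chars.startswith_iff _ _).1 hb
    have h1 : pvSplitEq s.toList = (flag.toList, true) := by
      rw [← ht, hfe, List.append_assoc]
      exact splitEq_append _ _ hf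
    have h2 : pvSplitEq s.toList = (p, true) := by rw [hl]; exact splitEq_append _ _ hp
    exact hpd ((Prod.ext_iff.mp (h1 ▸ h2)).1).symm

theorem toList_inj_str (s t : String) : s = t ↔ s.toList = t.toList :=
  ⟨fun he => he ▸ rfl, fun he => by
    have h1 : String.ofList s.toList = String.ofList t.toList := he ▸ rfl
    rwa [String.ofList_toList, String.ofList_toList] at h1⟩

theorem contains_eq (s : String) : pvLinkFlags.contains s =
    (decide (s.toList = "-ldflags".toList) || decide (s.toList = "-linkmode".toList)
     || decide (s.toList = "-extld".toList) || decide (s.toList = "-extldflags".toList)) := by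
  rw [Bool.eq_iff_iff, PySem.Set.contains_iff]
  have h : pvLinkFlags = PySem.Set.ofList ["-ldflags", "-linkmode", "-extld", "-extldflags"] := rfl
  rw [h, PySem.Set.mem_ofList]
  simp only [List.mem_cons, List.not_mem_nil, or_false, Bool.or_eq_true, decide_eq_true_eq]
  simp only [toList_inj_str s]
  tauto

theorem startswith_false_of_no_eq (s flagEq : String) (hmem : '=' ∈ flagEq.toList)
    (h : '=' ∉ s.toList) : PySem.Str.startswith s flagEq = false := by
  rw [← Bool.not_eq_true, PySem.Str.startswith_eq]
  intro hb
  obtain ⟨t, ht⟩ := (PySem.Chars.startswith_iff _ _).1 hb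
  exact h (by rw [← ht]; exact List.mem_append_left _ hmem)

theorem elem_eq (s : String) : pvAElem s = pvBElem s := by
  unfold pvAElem pvBElem
  rcases splitEq_cases s.toList with h | ⟨p, rest, hl, hp⟩
  · rw [splitEq_no _ h, contains_eq,
        startswith_false_of_no_eq s "-ldflags=" (by decide) h,
        startswith_false_of_no_eq s "-linkmode=" (by decide) h]
    rw [Bool.eq_iff_iff]
    simp
    tauto
  · have hmem : '=' ∈ s.toList := by rw [hl]; simp
    rw [hl, splitEq_append _ _ hp, contains_eq,
        startswith_head s "-ldflags" "-ldflags=" (by decide) (by decide) p rest hl hp,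
        startswith_head s "-linkmode" "-linkmode=" (by decide) (by decide) p rest hl hp]
    have hne : ∀ t : List Char, '=' ∉ t → s.toList ≠ t := by
      intro t ht he; exact ht (he ▸ hmem)
    have k : ∀ t : List Char, '=' ∉ t → (s.toList = t ↔ False) :=
      fun t ht => iff_false_intro (hne t ht)
    rw [Bool.eq_iff_iff]
    simp only [Bool.or_eq_true, Bool.and_eq_true, decide_eq_true_eq]
    rw [k "-ldflags".toList (by decide), k "-linkmode".toList (by decide),
        k "-extld".toList (by decide), k "-extldflags".toList (by decide)]
    tauto

-- ===== VERDICT (by name: the statement is the Claim_ definition above) =====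
theorem inter_nonempty_iff_any (argv : List String) :
    (PySem.Set.inter (PySem.Set.ofList argv) pvLinkFlags ≠ []) ↔
      argv.any (fun arg => pvLinkFlags.contains arg) = true := by
  rw [← List.isEmpty_eq_false_iff, List.isEmpty_eq_false_iff_exists_mem]
  simp only [List.any_eq_true]
  constructor
  · rintro ⟨x, hx⟩
    obtain ⟨h1, h2⟩ := (PySem.Set.mem_inter _ _ x).1 hx
    exact ⟨x, (PySem.Set.mem_ofList _ x).1 h1, by simpa using h2⟩
  · rintro ⟨x, hx, hf⟩
    exact ⟨x, (PySem.Set.mem_inter _ _ x).2 ⟨(PySem.Set.mem_ofList _ x).2 hx, by simpa using hf⟩⟩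

theorem hasA_eq_any (argv : List String) : has_ldflags argv = argv.any pvAElem := by
  unfold has_ldflags
  rw [pvLoopA_eq_any]
  by_cases h : PySem.Set.inter (PySem.Set.ofList argv) pvLinkFlags ≠ []
  · rw [if_pos h]
    obtain ⟨x, hx, hf⟩ := List.any_eq_true.1 ((inter_nonempty_iff_any argv).1 h)
    rw [PySem.Set.contains_iff] at hf
    exact (List.any_eq_true.2 ⟨x, hx, by unfold pvAElem; simp [hf]⟩).symm
  · rw [if_neg h]
    have hno : ∀ x ∈ argv, x ∉ pvLinkFlags := by
      intro x hx hc
      exact h ((inter_nonempty_iff_any argv).2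
        (List.any_eq_true.2 ⟨x, hx, by rw [PySem.Set.contains_iff]; exact hc⟩))
    rw [Bool.eq_iff_iff, List.any_eq_true, List.any_eq_true]
    constructor <;> rintro ⟨x, hx, hpx⟩ <;>
      exact ⟨x, hx, by revert hpx; unfold pvAElem; simp [hno x hx]⟩

theorem has_ldflags_spec : Claim_equal_has_ldflags := by
  intro argv _
  unfold Spec_has_ldflags has_ldflags_alt
  rw [hasA_eq_any, pvLoopB_eq_any]
  rw [show pvAElem = pvBElem from funext elem_eq]
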